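-- pv_equiv track=rewrite | github.com/tiandiyijian/myLeetcode | week290/6044.py | fullBloomFlowers
-- ===== SOURCE A (Python) =====
-- from typing import List
--
-- def fullBloomFlowers(flowers: List[List[int]], persons: List[int]) -> List[int]:
--     # 应该是用线段树, 数据范围太大用差分数组直接爆了
--     # 可惜不会
--     # 看了答案发现还是用差分数组的思想, 太妙了
--     events = []
--     for start, end in flowers:
--         events.append([start, -1, 1])
--         events.append([end+1, -1, -1])
--
--     for i, t in enumerate(persons):
--         events.append([t, i, 0])
--
--     events.sort()
--
--     ans = [0] * (len(persons))
--     now = 0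
--     for t, idx, inc in events:
--         now += inc
--         if idx >= 0:
--             ans[idx] = now
--
--     return ans
-- ===== SOURCE B (Python) =====
-- def fullBloomFlowers(flowers, persons):
--     # For each query time independently: (#flowers started by t) - (#flowers ended before t).
--     return [sum((s <= t) - (e < t) for s, e in flowers) for t in persons]
-- ===== Notes on version B (the rewrite author's own statement) =====
-- stated objective: simpler
-- what changed: Replaced A's build-events/sort/stateful-sweep (with per-person indexed writes into a preallocated answer array) by a direct per-query count: for each time t the answer is #(starts <= t) - #(ends < t), computed in one comprehension with no event list, no sort and no mutable state.
import Mathlib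
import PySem

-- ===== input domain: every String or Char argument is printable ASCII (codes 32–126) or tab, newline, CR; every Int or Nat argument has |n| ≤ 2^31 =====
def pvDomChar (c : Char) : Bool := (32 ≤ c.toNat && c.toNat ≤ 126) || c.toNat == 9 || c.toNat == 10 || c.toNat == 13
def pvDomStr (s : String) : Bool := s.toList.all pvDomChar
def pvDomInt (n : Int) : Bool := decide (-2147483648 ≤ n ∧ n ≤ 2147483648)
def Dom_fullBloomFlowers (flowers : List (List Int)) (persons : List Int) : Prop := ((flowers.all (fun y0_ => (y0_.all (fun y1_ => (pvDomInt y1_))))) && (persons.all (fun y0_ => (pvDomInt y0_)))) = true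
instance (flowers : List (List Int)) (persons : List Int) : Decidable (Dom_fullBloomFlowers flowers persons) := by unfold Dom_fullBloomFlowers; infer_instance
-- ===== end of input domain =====

-- B replaces A's build-events/sort/sweep by an independent per-query count
-- #(starts <= t) - #(ends < t); equivalence of return values is proved on rows of length 2.

-- ===== PORT A =====
-- Python sorts the length-3 int lists in events lexicographically; the port keeps
-- them as integer triples and sorts by the exact lexicographic key (Lex of pairs).
def evKey (e : Int × Int × Int) : Lex (Int × Lex (Int × Int)) := toLex (e.1, toLex (e.2.1, e.2.2))

-- one step of A's sweep loop: state is (now, ans); 'ans[idx] = now' guarded by idx >= 0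
def sweepStep (st : Int × List Int) (e : Int × Int × Int) : Int × List Int :=
  (st.1 + e.2.2, if 0 ≤ e.2.1 then st.2.set e.2.1.toNat (st.1 + e.2.2) else st.2)

def fullBloomFlowers (flowers : List (List Int)) (persons : List Int) : List Int :=
  let events : List (Int × Int × Int) :=
    flowers.foldl (fun ev f => ev ++ [(f.getD 0 0, -1, 1), (f.getD 1 0 + 1, -1, -1)]) []
  let events := (PySem.List.enumerate persons 0).foldl (fun ev it => ev ++ [(it.2, it.1, 0)]) events
  let events := PySem.List.sorted events evKey false
  (events.foldl sweepStep (0, List.replicate persons.length 0)).2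

-- ===== PORT B =====
def fullBloomFlowers_alt (flowers : List (List Int)) (persons : List Int) : List Int :=
  persons.map (fun t => flowers.foldl (fun acc f =>
    acc + ((if f.getD 0 0 ≤ t then (1 : Int) else 0) - (if f.getD 1 0 < t then (1 : Int) else 0))) 0)

-- ===== PRECONDITION & SPEC =====
-- Pre_ excludes only inputs where A raises: a row of length ≠ 2 makes Python's
-- 'for start, end in flowers' raise ValueError (B's unpacking raises there too).
def Pre_fullBloomFlowers (flowers : List (List Int)) (_persons : List Int) : Prop :=
  ∀ f ∈ flowers, f.length = 2

instance (flowers : List (List Int)) (persons : List Int) : Decidable (Pre_fullBloomFlowers flowers persons) := by unfold Pre_fullBloomFlowers; infer_instance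

def pvWitness_fullBloomFlowers : List (List Int) × List Int := ([[1, 6], [3, 7], [9, 12]], [2, 3, 7, 11])

def Spec_fullBloomFlowers (flowers : List (List Int)) (persons : List Int) (out : List Int) : Prop := out = fullBloomFlowers_alt flowers persons
instance (flowers : List (List Int)) (persons : List Int) (out : List Int) : Decidable (Spec_fullBloomFlowers flowers persons out) := by unfold Spec_fullBloomFlowers; infer_instance

-- ===== CLAIM (what is proved, stated in full; the proofs are below) =====
def Claim_equal_fullBloomFlowers : Prop := ∀ (flowers : List (List Int)) (persons : List Int), Dom_fullBloomFlowers flowers persons → Pre_fullBloomFlowers flowers persons → Spec_fullBloomFlowers flowers persons (fullBloomFlowers flowers persons)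

-- ===== LEMMAS AND PROOFS =====

theorem evKey_lt (a b : Int × Int × Int) :
    evKey a < evKey b ↔ (a.1 < b.1 ∨ (a.1 = b.1 ∧ (a.2.1 < b.2.1 ∨ (a.2.1 = b.2.1 ∧ a.2.2 < b.2.2)))) := by
  simp [evKey, Prod.Lex.toLex_lt_toLex]

theorem evKey_inj {a b : Int × Int × Int} (h : evKey a = evKey b) : a = b := by
  simp only [evKey, toLex_inj, Prod.mk.injEq] at h
  obtain ⟨h1, h2, h3⟩ := h
  exact Prod.ext h1 (Prod.ext h2 h3)

theorem sweep_len (E : List (Int × Int × Int)) : ∀ (st : Int × List Int),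
    ((E.foldl sweepStep st).2).length = st.2.length := by
  induction E with
  | nil => intro st; rfl
  | cons e E ih =>
    intro st
    simp only [List.foldl_cons, sweepStep]
    rw [ih]
    split <;> simp

theorem sweep_fst (E : List (Int × Int × Int)) : ∀ (st : Int × List Int),
    (E.foldl sweepStep st).1 = st.1 + (E.map (fun e => e.2.2)).sum := by
  induction E with
  | nil => intro st; simp
  | cons e E ih =>
    intro st
    simp only [List.foldl_cons, sweepStep, List.map_cons, List.sum_cons]
    rw [ih]; ring

theorem sweep_untouched (E : List (Int × Int × Int)) (i : Nat) : ∀ (st : Int × List Int),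
    (∀ e ∈ E, e.2.1 ≠ (i : Int)) → ((E.foldl sweepStep st).2)[i]? = st.2[i]? := by
  induction E with
  | nil => intro st _; rfl
  | cons e E ih =>
    intro st h
    simp only [List.foldl_cons, sweepStep]
    rw [ih _ (fun x hx => h x (List.mem_cons_of_mem _ hx))]
    by_cases hpos : 0 ≤ e.2.1
    · rw [if_pos hpos, List.getElem?_set_ne (by have := h e List.mem_cons_self; omega)]
    · rw [if_neg hpos]

-- the filter by index over the person events isolates exactly person i's event
theorem filt_enum (ps : List Int) : ∀ (s : Int) (i : Nat) (h : i < ps.length),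
    ((PySem.List.enumerate ps s).map (fun it => (it.2, it.1, (0 : Int)))).filter
        (fun e => decide (e.2.1 = s + (i : Int)))
      = [(ps[i], s + (i : Int), 0)] := by
  induction ps with
  | nil => intro s i h; simp at h
  | cons x xs ih =>
    intro s i h
    rw [PySem.List.enumerate_cons]
    cases i with
    | zero =>
      simp only [List.map_cons, List.filter_cons]
      have hs : (decide ((s : Int) = s + ((0 : Nat) : Int))) = true := by simp
      rw [hs]
      simp only [if_true]
      have htail : ((PySem.List.enumerate xs (s+1)).map (fun it => (it.2, it.1, (0 : Int)))).filter
          (fun e => decide (e.2.1 = s + ((0 : Nat) : Int))) = [] := by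
        rw [List.filter_eq_nil_iff]
        intro e he
        simp only [List.mem_map] at he
        obtain ⟨it, hit, rfl⟩ := he
        rw [PySem.List.mem_enumerate_iff] at hit
        obtain ⟨k, hk, rfl⟩ := hit
        simp; omega
      rw [htail]
      simp
    | succ k =>
      simp only [List.map_cons, List.filter_cons]
      have hs : (decide ((s : Int) = s + ((k + 1 : Nat) : Int))) = false := by
        simp; omega
      rw [hs]
      simp only [Bool.false_eq_true, if_false]
      have hcast : s + ((k + 1 : Nat) : Int) = (s + 1) + (k : Int) := by push_cast; ring
      rw [hcast]
      have := ih (s + 1) k (by simpa using h)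
      simpa using this

-- the flower events strictly before person i's event contribute #(starts<=t) - #(ends<t)
theorem sumF (fl : List (List Int)) (t j : Int) (hj : 0 ≤ j) :
    (((fl.flatMap (fun f => [(f.getD 0 0, (-1 : Int), (1 : Int)), (f.getD 1 0 + 1, -1, -1)])).filter
        (fun e => decide (evKey e < evKey (t, j, 0)))).map (fun e => e.2.2)).sum
    = (fl.map (fun f => (if f.getD 0 0 ≤ t then (1 : Int) else 0) - (if f.getD 1 0 < t then (1 : Int) else 0))).sum := by
  induction fl with
  | nil => rfl
  | cons f fl ih =>
    rw [List.flatMap_cons, List.filter_append, List.map_append, List.sum_append, ih,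
      List.map_cons, List.sum_cons]
    have h1 : ((decide (evKey (f.getD 0 0, (-1 : Int), (1 : Int)) < evKey (t, j, 0))) = true)
        ↔ f.getD 0 0 ≤ t := by
      simp only [decide_eq_true_eq]; rw [evKey_lt]; simp; omega
    have h2 : ((decide (evKey (f.getD 1 0 + 1, (-1 : Int), (-1 : Int)) < evKey (t, j, 0))) = true)
        ↔ f.getD 1 0 < t := by
      simp only [decide_eq_true_eq]; rw [evKey_lt]; simp; omega
    rw [List.filter_cons, List.filter_cons, List.filter_nil]
    by_cases hs : f.getD 0 0 ≤ t <;> by_cases he : f.getD 1 0 < t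
    · rw [if_pos (h1.mpr hs), if_pos (h2.mpr he), if_pos hs, if_pos he]; simp
    · rw [if_pos (h1.mpr hs), if_neg (fun c => he (h2.mp c)), if_pos hs, if_neg he]; simp
    · rw [if_neg (fun c => hs (h1.mp c)), if_pos (h2.mpr he), if_neg hs, if_pos he]; simp
    · rw [if_neg (fun c => hs (h1.mp c)), if_neg (fun c => he (h2.mp c)), if_neg hs, if_neg he]
      simp

theorem flatMap_single {α β : Type} (l : List α) (g : α → β) :
    l.flatMap (fun x => [g x]) = l.map g := by
  induction l with
  | nil => rfl
  | cons x l ih => simp [ih]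

theorem fullBloomFlowers_spec_aux (flowers : List (List Int)) (persons : List Int) :
    fullBloomFlowers flowers persons = fullBloomFlowers_alt flowers persons := by
  simp only [fullBloomFlowers, fullBloomFlowers_alt,
    PySem.List.foldl_append_eq_flatMap, List.nil_append]
  set F : List (Int × Int × Int) :=
    flowers.flatMap (fun f => [(f.getD 0 0, -1, 1), (f.getD 1 0 + 1, -1, -1)]) with hF
  set P : List (Int × Int × Int) :=
    (PySem.List.enumerate persons 0).flatMap (fun x => [(x.2, x.1, 0)]) with hP
  have hPmap : P = (PySem.List.enumerate persons 0).map (fun it => (it.2, it.1, 0)) := by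
    rw [hP, flatMap_single]
  apply List.ext_getElem?
  intro i
  by_cases hi : i < persons.length
  · -- the two filter computations isolating person i's event
    have hfilF : F.filter (fun e => decide (e.2.1 = (i : Int))) = [] := by
      rw [List.filter_eq_nil_iff]
      intro e he
      rw [hF, List.mem_flatMap] at he
      obtain ⟨f, _, hf⟩ := he
      simp only [List.mem_cons, List.not_mem_nil, or_false] at hf
      rcases hf with rfl | rfl <;> simp
    have hfilP : P.filter (fun e => decide (e.2.1 = (i : Int))) = [(persons[i], (i : Int), 0)] := by
      have h0 := filt_enum persons 0 i hi
      rw [hPmap]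
      simpa using h0
    have hfil : (F ++ P).filter (fun e => decide (e.2.1 = (i : Int)))
        = [(persons[i], (i : Int), 0)] := by
      rw [List.filter_append, hfilF, hfilP, List.nil_append]
    have hperm : (PySem.List.sorted (F ++ P) evKey false).Perm (F ++ P) :=
      PySem.List.sorted_perm _ _ _
    have hfilS : (PySem.List.sorted (F ++ P) evKey false).filter
        (fun e => decide (e.2.1 = (i : Int))) = [(persons[i], (i : Int), 0)] := by
      have h1 := hperm.filter (fun e => decide (e.2.1 = (i : Int)))
      rw [hfil] at h1
      exact List.perm_singleton.mp h1
    obtain ⟨E1, E2, hsplit, hE1, hpeq, hE2f⟩ := List.filter_eq_cons_iff.mp hfilS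
    have hE2 := List.filter_eq_nil_iff.mp hE2f
    -- order facts from sortedness
    have hpw := PySem.List.sorted_pairwise (F ++ P) evKey
    rw [hsplit, List.pairwise_append] at hpw
    obtain ⟨_, hpw2, hcross⟩ := hpw
    rw [List.pairwise_cons] at hpw2
    have hE1le : ∀ e ∈ E1, evKey e ≤ evKey (persons[i], (i : Int), 0) :=
      fun e he => hcross e he _ List.mem_cons_self
    have hE2ge : ∀ e ∈ E2, evKey (persons[i], (i : Int), 0) ≤ evKey e := hpw2.1
    have hE1lt : ∀ e ∈ E1, evKey e < evKey (persons[i], (i : Int), 0) := by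
      intro e he
      rcases lt_or_eq_of_le (hE1le e he) with h | h
      · exact h
      · exfalso
        have hepe := evKey_inj h
        have := hE1 e he
        rw [hepe] at this
        simp at this
    have hE1filt : (PySem.List.sorted (F ++ P) evKey false).filter
        (fun e => decide (evKey e < evKey (persons[i], (i : Int), 0))) = E1 := by
      rw [hsplit, List.filter_append, List.filter_cons]
      have h1 : E1.filter (fun e => decide (evKey e < evKey (persons[i], (i : Int), 0))) = E1 :=
        List.filter_eq_self.mpr (fun e he => by simpa using hE1lt e he)
      have h3 : E2.filter (fun e => decide (evKey e < evKey (persons[i], (i : Int), 0))) = [] :=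
        List.filter_eq_nil_iff.mpr (fun e he => by simpa using not_lt.mpr (hE2ge e he))
      rw [h1, h3]
      simp
    have hsum : (E1.map (fun e => e.2.2)).sum
        = (((F ++ P).filter (fun e => decide (evKey e < evKey (persons[i], (i : Int), 0)))).map
            (fun e => e.2.2)).sum := by
      rw [← hE1filt]
      exact ((hperm.filter _).map _).sum_eq
    have hPzero : ((P.filter (fun e => decide (evKey e < evKey (persons[i], (i : Int), 0)))).map
        (fun e => e.2.2)).sum = 0 := by
      apply List.sum_eq_zero
      intro x hx
      simp only [List.mem_map] at hx
      obtain ⟨e, he, rfl⟩ := hx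
      have hmem := List.mem_of_mem_filter he
      rw [hPmap, List.mem_map] at hmem
      obtain ⟨it, _, rfl⟩ := hmem
      rfl
    -- run A's sweep over the split sorted list
    have hidxE2 : ∀ e ∈ E2, e.2.1 ≠ (i : Int) := fun e he => by simpa using hE2 e he
    rw [hsplit, List.foldl_append, List.foldl_cons,
      sweep_untouched E2 i _ hidxE2]
    simp only [sweepStep]
    rw [if_pos (by simp : (0 : Int) ≤ ((persons[i], (i : Int), (0 : Int)) : Int × Int × Int).2.1)]
    rw [show (((persons[i], (i : Int), (0 : Int)) : Int × Int × Int).2.1).toNat = i by simp]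
    rw [List.getElem?_set_self (by rw [sweep_len]; simpa)]
    rw [sweep_fst]
    rw [List.getElem?_map, List.getElem?_eq_getElem hi]
    simp only [Option.map_some, Option.some.injEq]
    rw [PySem.List.foldl_add, hsum, List.filter_append, List.map_append, List.sum_append,
      hPzero, add_zero, sumF flowers (persons[i]) (i : Int) (by omega)]
    simp
  · rw [List.getElem?_eq_none, List.getElem?_eq_none]
    · simp; omega
    · rw [sweep_len]; simp; omega

-- ===== VERDICT (by name: the statement is the Claim_ definition above) =====
theorem fullBloomFlowers_spec : Claim_equal_fullBloomFlowers := by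
  intro flowers persons _ _
  exact fullBloomFlowers_spec_aux flowers persons
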